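-- pv_equiv track=rewrite | github.com/HISKP-LQCD/chroma-auxiliary-scripts | inventory.py | get_strides
-- ===== SOURCE A (Python) =====
-- import itertools
--
-- def get_strides(ranges):
--     if len(ranges) == 1:
--         yield ranges[0][0], ranges[0][1], 1
--         return
--
--     for length, groups in itertools.groupby(ranges, lambda x: x[1] - x[0]):
--         groups = list(groups)
--         if length != 0:
--             for a, b in groups:
--                 yield a, b, 1
--         else:
--             for offset, rgs in itertools.groupby(zip(groups[1:], groups[:-1]), lambda x: x[0][0] - x[1][0]):
--                 rgs = list(rgs)
--                 yield rgs[0][1][0], rgs[-1][0][0], offset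
-- ===== SOURCE B (Python) =====
-- def get_strides(ranges):
--     # one explicit pass with run-state instead of nested itertools.groupby/zip
--     if len(ranges) == 1:
--         yield ranges[0][0], ranges[0][1], 1
--         return
--     prev_a = None   # last point of the current zero-length run
--     run_start = None
--     stride = None
--     for a, b in ranges:
--         if b - a != 0:
--             if stride is not None:
--                 yield run_start, prev_a, stride
--             prev_a = run_start = stride = None
--             yield a, b, 1
--         else:
--             if prev_a is None:
--                 prev_a = a
--             elif stride is None:
--                 run_start, stride, prev_a = prev_a, a - prev_a, a
--             elif a - prev_a == stride:
--                 prev_a = a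
--             else:
--                 yield run_start, prev_a, stride
--                 run_start, stride, prev_a = prev_a, a - prev_a, a
--     if stride is not None:
--         yield run_start, prev_a, stride
-- ===== Notes on version B (the rewrite author's own statement) =====
-- stated objective: alternative
-- what changed: Replaced the nested itertools.groupby passes (group by length, then zip-and-regroup zero-length groups by offset) with a single explicit pass over ranges that maintains run state (run start, previous point, current stride) and flushes a stride tuple when the run breaks.
import Mathlib
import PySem

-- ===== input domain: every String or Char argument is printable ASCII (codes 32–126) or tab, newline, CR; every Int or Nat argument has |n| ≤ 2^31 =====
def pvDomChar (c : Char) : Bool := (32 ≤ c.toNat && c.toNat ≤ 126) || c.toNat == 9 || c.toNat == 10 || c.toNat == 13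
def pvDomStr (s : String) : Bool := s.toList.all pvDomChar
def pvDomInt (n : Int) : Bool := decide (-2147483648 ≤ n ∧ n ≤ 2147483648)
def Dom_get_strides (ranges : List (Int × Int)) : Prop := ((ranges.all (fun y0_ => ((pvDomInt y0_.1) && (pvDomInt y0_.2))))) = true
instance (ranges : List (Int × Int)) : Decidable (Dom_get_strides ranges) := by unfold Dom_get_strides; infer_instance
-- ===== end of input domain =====

-- B replaces A's nested itertools.groupby/zip passes by one explicit pass with run-state (alternative decomposition, same cost).

-- ===== PORT A =====
-- A-side helpers: itertools.groupby = consecutive runs of equal key, as (key, run) pairs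
def groupRuns {α : Type} (k : α → Int) : List α → List (Int × List α)
  | [] => []
  | x :: xs =>
    (k x, x :: xs.takeWhile (fun y => k y == k x)) :: groupRuns k (xs.dropWhile (fun y => k y == k x))
termination_by l => l.length
decreasing_by
  simp only [List.length_cons]
  exact Nat.lt_succ_of_le (List.length_dropWhile_le _ _)

-- lambda x: x[1] - x[0]
def keyLen (x : Int × Int) : Int := x.2 - x.1
-- lambda x: x[0][0] - x[1][0]
def offPair (p : (Int × Int) × (Int × Int)) : Int := p.1.1 - p.2.1
-- 'yield rgs[0][1][0], rgs[-1][0][0], offset' for one inner group (rgs is never empty)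
def strideRunOut (h : Int × List ((Int × Int) × (Int × Int))) : List (Int × Int × Int) :=
  match h.2 with
  | [] => []
  | r :: rs => [(r.2.1, (rs.getLastD r).1.1, h.1)]
-- the body of A's outer loop for one (length, groups) pair
def strideGroupOut (g : Int × List (Int × Int)) : List (Int × Int × Int) :=
  if g.1 ≠ 0 then
    g.2.map (fun x => (x.1, x.2, (1 : Int)))
  else
    (groupRuns offPair (g.2.tail.zip g.2.dropLast)).flatMap strideRunOut

def get_strides (ranges : List (Int × Int)) : List (Int × Int × Int) :=
  if ranges.length = 1 then
    match ranges with
    | (a, b) :: _ => [(a, b, 1)]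
    | [] => []
  else
    (groupRuns keyLen ranges).flatMap strideGroupOut

-- ===== PORT B =====
-- B-side helpers. state: none = no open zero-length run; some (pa, none) = run of the single
-- point pa; some (pa, some (rs, stde)) = run started at rs, last point pa, stride stde
def flushZ : Option (Int × Option (Int × Int)) → List (Int × Int × Int)
  | some (pa, some (rs, stde)) => [(rs, pa, stde)]
  | _ => []

def goStrides : List (Int × Int) → Option (Int × Option (Int × Int)) → List (Int × Int × Int)
  | [], st => flushZ st
  | (a, b) :: rest, st =>
    if b - a ≠ 0 then flushZ st ++ (a, b, 1) :: goStrides rest none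
    else
      match st with
      | none => goStrides rest (some (a, none))
      | some (pa, none) => goStrides rest (some (a, some (pa, a - pa)))
      | some (pa, some (rs, stde)) =>
        if a - pa = stde then goStrides rest (some (a, some (rs, stde)))
        else (rs, pa, stde) :: goStrides rest (some (a, some (pa, a - pa)))

def get_strides_alt (ranges : List (Int × Int)) : List (Int × Int × Int) :=
  if ranges.length = 1 then
    match ranges with
    | (a, b) :: _ => [(a, b, 1)]
    | [] => []
  else goStrides ranges none

-- ===== PRECONDITION & SPEC =====
def Spec_get_strides (ranges : List (Int × Int)) (out : List (Int × Int × Int)) : Prop := out = get_strides_alt ranges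
instance (ranges : List (Int × Int)) (out : List (Int × Int × Int)) : Decidable (Spec_get_strides ranges out) := by unfold Spec_get_strides; infer_instance

-- ===== CLAIM (what is proved, stated in full; the proofs are below) =====
def Claim_equal_get_strides : Prop := ∀ (ranges : List (Int × Int)), Dom_get_strides ranges → Spec_get_strides ranges (get_strides ranges)

-- ===== LEMMAS AND PROOFS =====

-- adjacent (next, prev) pairs: the zip(groups[1:], groups[:-1]) of A, in recursive form
def pairsF : List (Int × Int) → List ((Int × Int) × (Int × Int))
  | x :: y :: t => (y, x) :: pairsF (y :: t)
  | _ => []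

-- B's zero-run streaming, isolated from goStrides
def zrun : Int × Option (Int × Int) → List (Int × Int) → List (Int × Int × Int)
  | (_, none), [] => []
  | (pa, some (rs, stde)), [] => [(rs, pa, stde)]
  | (pa, none), y :: t => zrun (y.1, some (pa, y.1 - pa)) t
  | (pa, some (rs, stde)), y :: t =>
    if y.1 - pa = stde then zrun (y.1, some (rs, stde)) t
    else (rs, pa, stde) :: zrun (y.1, some (pa, y.1 - pa)) t

-- 'next' coordinate of the last pair of a run, d if the run is empty
def lastNextA (d : Int) : List ((Int × Int) × (Int × Int)) → Int
  | [] => d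
  | r :: rs => lastNextA r.1.1 rs

-- A's remaining inner output once a pair-run with start rs, stride stde is open and w was the last point
def AzTail (w : Int × Int) (rs stde : Int) (t : List (Int × Int)) : List (Int × Int × Int) :=
  (rs, lastNextA w.1 ((pairsF (w :: t)).takeWhile (fun p => offPair p == stde)), stde) ::
    (groupRuns offPair ((pairsF (w :: t)).dropWhile (fun p => offPair p == stde))).flatMap strideRunOut

theorem pairsF_eq : ∀ z : List (Int × Int), z.tail.zip z.dropLast = pairsF z := by
  intro z
  match z with
  | [] => simp [pairsF]
  | [x] => simp [pairsF]
  | x :: y :: t =>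
    have ih := pairsF_eq (y :: t)
    simp only [List.tail_cons, pairsF]
    rw [List.dropLast_cons₂, List.zip_cons_cons]
    simp only [List.tail_cons] at ih
    rw [ih]

theorem getLastD_fst_eq : ∀ (l : List ((Int × Int) × (Int × Int))) (r : (Int × Int) × (Int × Int)),
    (l.getLastD r).1.1 = lastNextA r.1.1 l := by
  intro l
  induction l with
  | nil => intro r; rfl
  | cons a t ih => intro r; rw [List.getLastD_cons, ih a]; rfl

theorem zrun_nil (s : Int × Option (Int × Int)) : zrun s [] = flushZ (some s) := by
  obtain ⟨pa, o⟩ := s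
  cases o with
  | none => rfl
  | some p => obtain ⟨rs, stde⟩ := p; rfl

theorem lcons (z w : Int × Int) (t' : List (Int × Int)) :
    (groupRuns offPair ((z, w) :: pairsF (z :: t'))).flatMap strideRunOut =
      AzTail z w.1 (z.1 - w.1) t' := by
  rw [groupRuns]
  simp only [List.flatMap_cons, AzTail, strideRunOut, offPair]
  rw [getLastD_fst_eq]
  rfl

theorem lz : ∀ (t : List (Int × Int)) (w : Int × Int) (rs stde : Int),
    zrun (w.1, some (rs, stde)) t = AzTail w rs stde t := by
  intro t
  induction t with
  | nil => intro w rs stde; simp [zrun, AzTail, pairsF, groupRuns, lastNextA]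
  | cons z t' ih =>
    intro w rs stde
    have hp : pairsF (w :: z :: t') = (z, w) :: pairsF (z :: t') := rfl
    by_cases h : z.1 - w.1 = stde
    · have h1 : zrun (w.1, some (rs, stde)) (z :: t') = zrun (z.1, some (rs, stde)) t' := by
        simp [zrun, h]
      rw [h1, ih z rs stde]
      simp only [AzTail, hp]
      rw [List.takeWhile_cons_of_pos (by simp [offPair, h]),
        List.dropWhile_cons_of_pos (by simp [offPair, h])]
      rfl
    · have h1 : zrun (w.1, some (rs, stde)) (z :: t') =
          (rs, w.1, stde) :: zrun (z.1, some (w.1, z.1 - w.1)) t' := by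
        simp [zrun, h]
      rw [h1, ih z w.1 (z.1 - w.1)]
      simp only [AzTail, hp]
      rw [List.takeWhile_cons_of_neg (by simp [offPair, h]),
        List.dropWhile_cons_of_neg (by simp [offPair, h]), lcons z w t']
      rfl

theorem zentry : ∀ (x : Int × Int) (run : List (Int × Int)),
    (groupRuns offPair (pairsF (x :: run))).flatMap strideRunOut = zrun (x.1, none) run := by
  intro x run
  cases run with
  | nil => simp [pairsF, groupRuns, zrun]
  | cons y t =>
    have hp : pairsF (x :: y :: t) = (y, x) :: pairsF (y :: t) := rfl
    rw [hp, lcons y x t]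
    have h1 : zrun (x.1, none) (y :: t) = zrun (y.1, some (x.1, y.1 - x.1)) t := by
      simp [zrun]
    rw [h1, lz t y x.1 (y.1 - x.1)]

-- a prefix of nonzero-length ranges streams element-wise through goStrides
theorem goN : ∀ (run rest : List (Int × Int)), (∀ y ∈ run, keyLen y ≠ 0) →
    goStrides (run ++ rest) none = run.map (fun x => (x.1, x.2, (1 : Int))) ++ goStrides rest none := by
  intro run
  induction run with
  | nil => intro rest _; simp
  | cons y t ih =>
    intro rest h
    obtain ⟨a, b⟩ := y
    have hne : b - a ≠ 0 := h (a, b) (by simp)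
    simp only [List.cons_append, goStrides]
    rw [if_pos hne, ih rest (fun y hy => h y (by simp [hy]))]
    rfl

-- a zero-length run with an open zero state streams as zrun, then goStrides continues fresh
theorem goZ : ∀ (run : List (Int × Int)) (rest : List (Int × Int)) (s : Int × Option (Int × Int)),
    (∀ y ∈ run, keyLen y = 0) →
    (∀ r t', rest = r :: t' → keyLen r ≠ 0) →
    goStrides (run ++ rest) (some s) = zrun s run ++ goStrides rest none := by
  intro run
  induction run with
  | nil =>
    intro rest s _ hr
    rw [List.nil_append, zrun_nil]
    cases rest with
    | nil =>
      rw [show goStrides [] none = ([] : List (Int × Int × Int)) from rfl, List.append_nil]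
      rfl
    | cons r t' =>
      obtain ⟨a, b⟩ := r
      have hne : b - a ≠ 0 := hr (a, b) t' rfl
      simp only [goStrides]
      rw [if_pos hne, if_pos hne]
      rfl
  | cons y t ih =>
    intro rest s h hr
    obtain ⟨a, b⟩ := y
    have hz : b - a = 0 := h (a, b) (by simp)
    obtain ⟨pa, o⟩ := s
    have ht : ∀ y ∈ t, keyLen y = 0 := fun y hy => h y (by simp [hy])
    cases o with
    | none =>
      simp only [List.cons_append, goStrides]
      rw [if_neg (by omega)]
      rw [ih rest (a, some (pa, a - pa)) ht hr]
      rfl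
    | some p =>
      obtain ⟨rs, stde⟩ := p
      by_cases hst : a - pa = stde
      · simp only [List.cons_append, goStrides]
        rw [if_neg (by omega), if_pos hst]
        rw [ih rest (a, some (rs, stde)) ht hr]
        have : zrun (pa, some (rs, stde)) ((a, b) :: t) = zrun (a, some (rs, stde)) t := by
          simp [zrun, hst]
        rw [this]
      · simp only [List.cons_append, goStrides]
        rw [if_neg (by omega), if_neg hst]
        rw [ih rest (a, some (pa, a - pa)) ht hr]
        have : zrun (pa, some (rs, stde)) ((a, b) :: t) =
            (rs, pa, stde) :: zrun (a, some (pa, a - pa)) t := by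
          simp [zrun, hst]
        rw [this]
        rfl

theorem dropWhile_head_not {α : Type} (p : α → Bool) :
    ∀ (l : List α) (r : α) (t : List α), l.dropWhile p = r :: t → p r = false := by
  intro l
  induction l with
  | nil => intro r t h; simp [List.dropWhile] at h
  | cons a l' ih =>
    intro r t h
    rw [List.dropWhile_cons] at h
    by_cases hp : p a = true
    · rw [if_pos hp] at h; exact ih r t h
    · rw [if_neg hp] at h
      cases h
      simpa using hp

theorem main_eq : ∀ (n : Nat) (xs : List (Int × Int)), xs.length ≤ n →
    (groupRuns keyLen xs).flatMap strideGroupOut = goStrides xs none := by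
  intro n
  induction n with
  | zero =>
    intro xs h
    have : xs = [] := List.length_eq_zero_iff.mp (Nat.le_zero.mp h)
    subst this
    rw [groupRuns]
    rfl
  | succ n ih =>
    intro xs h
    cases xs with
    | nil => rw [groupRuns]; rfl
    | cons x xs' =>
      set run := xs'.takeWhile (fun y => keyLen y == keyLen x) with hrun
      set rest := xs'.dropWhile (fun y => keyLen y == keyLen x) with hrest
      have hsplit : xs' = run ++ rest := (List.takeWhile_append_dropWhile).symm
      have hrestlen : rest.length ≤ n := by
        have h1 : rest.length ≤ xs'.length := List.length_dropWhile_le _ _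
        have h2 : xs'.length ≤ n := by simpa using Nat.succ_le_succ_iff.mp h
        omega
      have hG : groupRuns keyLen (x :: xs') = (keyLen x, x :: run) :: groupRuns keyLen rest := by
        rw [groupRuns]
      rw [hG, List.flatMap_cons, ih rest hrestlen]
      have hrunmem : ∀ y ∈ run, keyLen y = keyLen x := by
        intro y hy
        have := List.mem_takeWhile_imp (hrun ▸ hy)
        simpa using this
      have hresthead : ∀ r t', rest = r :: t' → keyLen r ≠ keyLen x := by
        intro r t' he
        have h2 : (keyLen r == keyLen x) = false :=
          dropWhile_head_not _ xs' r t' (by rw [← hrest, he])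
        simpa using h2
      obtain ⟨a, b⟩ := x
      by_cases hk : keyLen (a, b) ≠ 0
      · have hb : b - a ≠ 0 := by simpa [keyLen] using hk
        have hgo : goStrides ((a, b) :: xs') none = (a, b, 1) :: goStrides xs' none := by
          simp only [goStrides]
          rw [if_pos hb]
          rfl
        rw [hgo, hsplit, goN run rest (fun y hy => (hrunmem y hy) ▸ hk)]
        rw [strideGroupOut, if_pos hk]
        simp
      · rw [not_not] at hk
        have hb : b - a = 0 := by simpa [keyLen] using hk
        have hgo : goStrides ((a, b) :: xs') none = goStrides xs' (some (a, none)) := by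
          simp only [goStrides]
          rw [if_neg (by omega)]
        rw [hgo, hsplit,
          goZ run rest (a, none) (fun y hy => (hrunmem y hy).trans hk)
            (fun r t' he => by rw [← hk]; exact hresthead r t' he)]
        congr 1
        rw [strideGroupOut, if_neg (by simp [hk])]
        simp only
        rw [pairsF_eq ((a, b) :: run)]
        exact zentry (a, b) run

-- ===== VERDICT (by name: the statement is the Claim_ definition above) =====
theorem get_strides_spec : Claim_equal_get_strides := by
  intro ranges _
  unfold Spec_get_strides get_strides get_strides_alt
  by_cases h : ranges.length = 1
  · rw [if_pos h, if_pos h]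
  · rw [if_neg h, if_neg h]
    exact main_eq ranges.length ranges (le_refl _)
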